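-- pv_equiv track=rewrite | github.com/jndean/AlphaLogger | Game.py | stringify_move
-- ===== SOURCE A (Python) =====
-- def stringify_move(move, num_players):
--     num_actions = num_players + 8
--     motions = {
--         0: "Up2", 1: "UpLeft", 2: "Up", 3: "UpRight", 4: "Left2", 5: "Left", 6: "Stay",
--         7: "Right", 8: "Right2", 9: "DownLeft", 10: "Down", 11: "DownRight", 12: "Down2"
--     }
--     actions = {
--         0: "ChopUp", 1: "ChopLeft", 2: "ChopRight", 3: "ChopDown",
--         4: "PlantUp", 5: "PlantLeft", 6: "PlantRight", 7: "PlantDown",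
--     }
--     for i in range(num_players-1):
--         actions[8 + i] = f"Protest{i}"
--     actions[8 + num_players - 1] = "No Action"
--
--     return motions[move // num_actions], actions[move % num_actions]
-- ===== SOURCE B (Python) =====
-- MOTIONS = ("Up2", "UpLeft", "Up", "UpRight", "Left2", "Left", "Stay",
--            "Right", "Right2", "DownLeft", "Down", "DownRight", "Down2")
-- CHOPS = ("ChopUp", "ChopLeft", "ChopRight", "ChopDown",
--          "PlantUp", "PlantLeft", "PlantRight", "PlantDown")
--
--
-- def stringify_move(move, num_players):
--     num_actions = num_players + 8
--     motion = MOTIONS[move // num_actions]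
--     a = move % num_actions
--     if a < 8:
--         action = CHOPS[a]
--     elif a == num_actions - 1:
--         action = "No Action"
--     else:
--         action = f"Protest{a - 8}"
--     return motion, action
-- ===== Notes on version B (the rewrite author's own statement) =====
-- stated objective: faster
-- what changed: B replaces A's per-call construction of both lookup dicts (including the O(num_players) Protest-building loop) with direct O(1) computation: fixed tuples for the motion and Chop/Plant names plus arithmetic for Protest/No Action; Pre_ restricts to the natural domain num_players >= 1 (A's actions table is degenerate for num_players <= 0).
-- outside the precondition, e.g. on stringify_move(7, 0): A returns ('Up2', 'No Action'), B returns ('Up2', 'PlantDown'); on stringify_move(-5, 3): A raises KeyError, B returns ('Down2', 'PlantRight')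
import Mathlib
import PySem

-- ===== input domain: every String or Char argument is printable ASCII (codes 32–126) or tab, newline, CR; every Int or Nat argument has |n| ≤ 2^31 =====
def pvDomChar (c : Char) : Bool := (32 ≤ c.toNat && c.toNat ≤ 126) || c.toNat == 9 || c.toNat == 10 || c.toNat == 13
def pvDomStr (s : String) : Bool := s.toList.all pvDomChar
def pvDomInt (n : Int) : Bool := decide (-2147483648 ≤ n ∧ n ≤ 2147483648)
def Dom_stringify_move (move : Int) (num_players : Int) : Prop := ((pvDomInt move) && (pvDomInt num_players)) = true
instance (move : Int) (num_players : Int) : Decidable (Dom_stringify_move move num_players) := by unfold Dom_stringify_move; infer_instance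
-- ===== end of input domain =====

-- B computes the one needed motion/action entry directly from fixed tables and arithmetic,
-- instead of A's per-call construction of two dicts (simpler; return-value equivalence on Pre_).


-- ===== PORT A =====
-- (the literal dicts A builds each call; lookups motions[...]/actions[...] raise KeyError in
--  Python = get? none; Pre_ excludes those, so the .getD "" default is never reached)
def pvMotionsA : PySem.Dict Int String := PySem.Dict.ofList
  [(0, "Up2"), (1, "UpLeft"), (2, "Up"), (3, "UpRight"), (4, "Left2"), (5, "Left"),
   (6, "Stay"), (7, "Right"), (8, "Right2"), (9, "DownLeft"), (10, "Down"),
   (11, "DownRight"), (12, "Down2")]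

def pvActions0A : PySem.Dict Int String := PySem.Dict.ofList
  [(0, "ChopUp"), (1, "ChopLeft"), (2, "ChopRight"), (3, "ChopDown"),
   (4, "PlantUp"), (5, "PlantLeft"), (6, "PlantRight"), (7, "PlantDown")]

def stringify_move (move : Int) (num_players : Int) : String × String :=
  let num_actions := num_players + 8
  let motions := pvMotionsA
  let actions := pvActions0A
  let actions := (PySem.List.pyRange 0 (num_players - 1) 1).foldl
    (fun d i => d.insert (8 + i) ("Protest" ++ PySem.Int.toStr i)) actions
  let actions := actions.insert (8 + num_players - 1) "No Action"
  ((motions.get? (PySem.Int.floordiv move num_actions)).getD "",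
   (actions.get? (PySem.Int.mod move num_actions)).getD "")

-- ===== PORT B =====
def pvMotionsB : List String :=
  ["Up2", "UpLeft", "Up", "UpRight", "Left2", "Left", "Stay",
   "Right", "Right2", "DownLeft", "Down", "DownRight", "Down2"]

def pvChopsB : List String :=
  ["ChopUp", "ChopLeft", "ChopRight", "ChopDown",
   "PlantUp", "PlantLeft", "PlantRight", "PlantDown"]

def stringify_move_alt (move : Int) (num_players : Int) : String × String :=
  let num_actions := num_players + 8
  let motion := PySem.List.pyGetD pvMotionsB (PySem.Int.floordiv move num_actions) ""
  let a := PySem.Int.mod move num_actions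
  let action :=
    if a < 8 then PySem.List.pyGetD pvChopsB a ""
    else if a = num_actions - 1 then "No Action"
    else "Protest" ++ PySem.Int.toStr (a - 8)
  (motion, action)

-- ===== PRECONDITION & SPEC =====
-- Pre_ restricts to the game's natural domain num_players ≥ 1 (for num_players ≤ 0 A's actions
-- table is degenerate — "No Action" overwrites a Chop/Plant entry — or A raises), and to moves
-- whose motion quotient lies in 0..12 (otherwise A raises KeyError).
def Pre_stringify_move (move : Int) (num_players : Int) : Prop :=
  1 ≤ num_players ∧ 0 ≤ move ∧ move < 13 * (num_players + 8)
instance (move : Int) (num_players : Int) : Decidable (Pre_stringify_move move num_players) := by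
  unfold Pre_stringify_move; infer_instance

def pvWitness_stringify_move : Int × Int := (42, 3)

def Spec_stringify_move (move : Int) (num_players : Int) (out : String × String) : Prop :=
  out = stringify_move_alt move num_players
instance (move : Int) (num_players : Int) (out : String × String) :
    Decidable (Spec_stringify_move move num_players out) := by
  unfold Spec_stringify_move; infer_instance

-- ===== CLAIM (what is proved, stated in full; the proofs are below) =====
def Claim_equal_stringify_move : Prop := ∀ (move : Int) (num_players : Int),
  Dom_stringify_move move num_players → Pre_stringify_move move num_players →
  Spec_stringify_move move num_players (stringify_move move num_players)

-- ===== LEMMAS AND PROOFS =====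

-- the Protest loop, characterised: after inserting keys 8..8+m-1, any lookup
lemma protest_loop_get (m : Nat) (d : PySem.Dict Int String) (a : Int) :
    ((PySem.List.pyRange 0 (m : Int) 1).foldl
      (fun d i => d.insert (8 + i) ("Protest" ++ PySem.Int.toStr i)) d).get? a =
    if 8 ≤ a ∧ a < 8 + (m : Int) then some ("Protest" ++ PySem.Int.toStr (a - 8))
    else d.get? a := by
  induction m with
  | zero =>
      rw [PySem.List.pyRange_one_eq_nil (by norm_num), if_neg (by push_cast; omega)]
      rfl
  | succ k ih =>
      have hsplit : PySem.List.pyRange 0 ((k + 1 : Nat) : Int) 1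
          = PySem.List.pyRange 0 (k : Int) 1 ++ [(k : Int)] := by
        push_cast
        exact PySem.List.pyRange_one_succ_right (Int.natCast_nonneg k)
      rw [hsplit, List.foldl_append]
      simp only [List.foldl_cons, List.foldl_nil]
      rw [PySem.Dict.get?_insert]
      by_cases hak : a = 8 + (k : Int)
      · rw [if_pos hak, if_pos (by push_cast; omega)]
        have h8 : a - 8 = (k : Int) := by omega
        rw [h8]
      · rw [if_neg hak, ih]
        by_cases h1 : 8 ≤ a ∧ a < 8 + (k : Int)
        · rw [if_pos h1, if_pos (by push_cast; omega)]
        · rw [if_neg h1, if_neg (by push_cast; omega)]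

theorem stringify_move_spec : Claim_equal_stringify_move := by
  intro move num_players _ hpre
  obtain ⟨hP, hm0, hm13⟩ := hpre
  unfold Spec_stringify_move
  have hn : (0 : Int) < num_players + 8 := by omega
  set n := num_players + 8 with hn_def
  set q := PySem.Int.floordiv move n with hq_def
  set a := PySem.Int.mod move n with ha_def
  have hq0 : 0 ≤ q := by
    rw [hq_def, PySem.Int.le_floordiv_iff_mul_le hn]; omega
  have hq13 : q < 13 := by
    rw [hq_def, PySem.Int.floordiv_lt_iff_lt_mul hn]; omega
  have ha0 : 0 ≤ a := PySem.Int.mod_nonneg move hn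
  have han : a < n := PySem.Int.mod_lt move hn
  have hAeq : stringify_move move num_players =
      ((pvMotionsA.get? q).getD "",
       ((((PySem.List.pyRange 0 (num_players - 1) 1).foldl
            (fun d i => d.insert (8 + i) ("Protest" ++ PySem.Int.toStr i))
            pvActions0A).insert (8 + num_players - 1) "No Action").get? a).getD "") := rfl
  have hBeq : stringify_move_alt move num_players =
      (PySem.List.pyGetD pvMotionsB q "",
       if a < 8 then PySem.List.pyGetD pvChopsB a ""
       else if a = n - 1 then "No Action"
       else "Protest" ++ PySem.Int.toStr (a - 8)) := rfl
  rw [hAeq, hBeq, Prod.mk.injEq]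
  clear_value n q a
  refine ⟨?_, ?_⟩
  · -- motion component: a 13-entry table lookup on both sides
    interval_cases q <;> decide
  · -- action component
    obtain ⟨m, hm⟩ : ∃ m : Nat, (m : Int) = num_players - 1 :=
      ⟨(num_players - 1).toNat, by omega⟩
    rw [PySem.Dict.get?_insert, ← hm, protest_loop_get]
    by_cases h1 : a = 8 + num_players - 1
    · rw [if_pos h1, if_neg (by omega), if_pos (by omega)]
      rfl
    · rw [if_neg h1]
      by_cases h2 : 8 ≤ a ∧ a < 8 + (m : Int)
      · rw [if_pos h2, if_neg (by omega), if_neg (by omega)]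
        rfl
      · rw [if_neg h2]
        have ha8 : a < 8 := by omega
        rw [if_pos ha8]
        interval_cases a <;> decide
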